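-- pv_equiv track=rewrite | github.com/dominikpeter/useful-python-code | best_price.py | calc_price_rec
-- ===== SOURCE A (Python) =====
-- def calc_price_rec(d, quantity, index):
--     stack = index[0]
--     if stack > quantity:
--         index.pop(0)
--         return calc_price_rec(d, quantity, index)
--     if quantity % stack == 0:
--         return quantity * d[stack]
--     else:
--         intDivision = int(quantity / stack)
--         price = intDivision * d[stack] * stack
--         remainder = quantity % stack
--         index.pop(0)
--         return price + calc_price_rec(d, remainder, index)
-- ===== SOURCE B (Python) =====
-- def calc_price_rec(d, quantity, index):
--     # Iterative reformulation: a while-loop with a running total instead of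
--     # recursion; entries too large for the current quantity are passed over.
--     # Mutates `index` exactly like A: pops every entry before the final one.
--     total = 0
--     while True:
--         stack = index[0]
--         if stack <= quantity:
--             if quantity % stack == 0:
--                 return total + quantity * d[stack]
--             total += int(quantity / stack) * d[stack] * stack
--             quantity %= stack
--         index.pop(0)
-- ===== Notes on version B (the rewrite author's own statement) =====
-- stated objective: alternative
-- what changed: A's non-tail recursion (each call adds its pack price to the recursive result) is replaced by an iterative while-loop that carries a running total accumulator and updates quantity in place.
import Mathlib
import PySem

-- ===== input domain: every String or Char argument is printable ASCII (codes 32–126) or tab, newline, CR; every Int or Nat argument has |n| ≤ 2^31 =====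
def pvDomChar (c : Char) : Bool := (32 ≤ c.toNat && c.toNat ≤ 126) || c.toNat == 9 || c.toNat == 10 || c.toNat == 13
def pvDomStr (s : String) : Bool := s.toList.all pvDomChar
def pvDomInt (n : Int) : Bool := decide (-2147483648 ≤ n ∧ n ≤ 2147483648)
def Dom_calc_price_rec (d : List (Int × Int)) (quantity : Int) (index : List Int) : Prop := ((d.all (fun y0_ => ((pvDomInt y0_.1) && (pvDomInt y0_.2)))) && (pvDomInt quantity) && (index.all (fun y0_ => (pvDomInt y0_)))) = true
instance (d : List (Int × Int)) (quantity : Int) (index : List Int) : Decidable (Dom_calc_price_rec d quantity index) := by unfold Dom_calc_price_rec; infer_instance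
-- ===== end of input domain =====

-- B replaces A's recursion by an iterative accumulator loop (in Lean: tail recursion
-- carrying the running total), objective: alternative decomposition, same cost.
-- Both versions mutate `index` identically in Python (popping every processed entry);
-- the theorems below are about the RETURN value only.

-- ===== PORT A =====
-- d[stack] on the association list: first match, default 0 (KeyError excluded by Pre_)
def pyDictGet (d : List (Int × Int)) (k : Int) : Int := (d.lookup k).getD 0

def calc_price_rec (d : List (Int × Int)) (quantity : Int) (index : List Int) : Int :=
  match index with
  | [] => 0            -- Python raises IndexError on index[0]; excluded by Pre_
  | stack :: rest =>   -- stack = index[0]; index.pop(0) = recursing on rest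
    if stack > quantity then
      calc_price_rec d quantity rest
    else if PySem.Int.mod quantity stack = 0 then
      quantity * pyDictGet d stack
    else
      -- int(quantity / stack): truncating division, exact on Dom's |n| ≤ 2^31 floats
      let intDivision := PySem.Int.truncdiv quantity stack
      let price := intDivision * pyDictGet d stack * stack
      let remainder := PySem.Int.mod quantity stack
      price + calc_price_rec d remainder rest

-- ===== PORT B =====
-- Source B's while-loop with its running total; `index.pop(0)` at the end of the body
-- = tail call on rest, `total` is the accumulator.
def calcPriceLoop (d : List (Int × Int)) (quantity : Int) (index : List Int) (total : Int) : Int :=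
  match index with
  | [] => total        -- Python raises IndexError on index[0]; excluded by Pre_
  | stack :: rest =>
    if stack ≤ quantity then
      if PySem.Int.mod quantity stack = 0 then
        total + quantity * pyDictGet d stack
      else
        calcPriceLoop d (PySem.Int.mod quantity stack) rest
          (total + PySem.Int.truncdiv quantity stack * pyDictGet d stack * stack)
    else
      calcPriceLoop d quantity rest total

def calc_price_rec_alt (d : List (Int × Int)) (quantity : Int) (index : List Int) : Int :=
  calcPriceLoop d quantity index 0

-- ===== PRECONDITION & SPEC =====
-- Whether the Python raises depends on the whole greedy run (which pack sizes get
-- applied to the shrinking quantity), so the returning set has no static shape: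
-- pyReturns states it as the success of that run — the greedy walk down `index`
-- reaches, before the list is exhausted (IndexError), an applicable pack size that
-- is nonzero (else ZeroDivisionError), priced in d (else KeyError) and divides the
-- remaining quantity, every earlier applicable pack size being nonzero and priced.
def pyReturns (d : List (Int × Int)) : Int → List Int → Bool
  | _, [] => false
  | q, stack :: rest =>
    if stack > q then pyReturns d q rest
    else if stack = 0 then false
    else if PySem.Int.mod q stack = 0 then (d.lookup stack).isSome
    else (d.lookup stack).isSome && pyReturns d (PySem.Int.mod q stack) rest

-- Pre_ is exactly the set of inputs on which the Python A returns normally;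
-- on every input outside it A (and B alike) raises IndexError, ZeroDivisionError
-- or KeyError, so nothing A returns on is excluded.
def Pre_calc_price_rec (d : List (Int × Int)) (quantity : Int) (index : List Int) : Prop :=
  pyReturns d quantity index = true
instance (d : List (Int × Int)) (quantity : Int) (index : List Int) : Decidable (Pre_calc_price_rec d quantity index) := by unfold Pre_calc_price_rec; infer_instance

def pvWitness_calc_price_rec : (List (Int × Int)) × Int × List Int := ([(3, 10), (1, 4)], 7, [3, 1])

def Spec_calc_price_rec (d : List (Int × Int)) (quantity : Int) (index : List Int) (out : Int) : Prop := out = calc_price_rec_alt d quantity index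
instance (d : List (Int × Int)) (quantity : Int) (index : List Int) (out : Int) : Decidable (Spec_calc_price_rec d quantity index out) := by unfold Spec_calc_price_rec; infer_instance

-- ===== CLAIM (what is proved, stated in full; the proofs are below) =====
def Claim_equal_calc_price_rec : Prop := ∀ (d : List (Int × Int)) (quantity : Int) (index : List Int), Dom_calc_price_rec d quantity index → Pre_calc_price_rec d quantity index → Spec_calc_price_rec d quantity index (calc_price_rec d quantity index)

-- ===== LEMMAS AND PROOFS =====

-- Loop invariant: B's accumulator loop computes `total +` A's recursive price
-- (the two perform the same arithmetic step for step, so this needs no hypotheses).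
lemma calcPriceLoop_eq (d : List (Int × Int)) (index : List Int) :
    ∀ (q total : Int), calcPriceLoop d q index total = total + calc_price_rec d q index := by
  induction index with
  | nil => intro q total; simp [calcPriceLoop, calc_price_rec]
  | cons stack rest ih =>
    intro q total
    by_cases hle : stack ≤ q
    · simp only [calcPriceLoop, calc_price_rec, if_pos hle, if_neg (by omega : ¬ stack > q)]
      by_cases hz : PySem.Int.mod q stack = 0
      · simp [hz]
      · simp only [if_neg hz, ih]; ring
    · simp only [calcPriceLoop, calc_price_rec, if_neg hle, if_pos (by omega : stack > q)]
      exact ih q total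

-- ===== VERDICT (by name: the statement is the Claim_ definition above) =====
theorem calc_price_rec_spec : Claim_equal_calc_price_rec := by
  intro d q index _ _
  unfold Spec_calc_price_rec calc_price_rec_alt
  rw [calcPriceLoop_eq d index q 0]
  ring
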